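-- pv_equiv track=rewrite | github.com/phimachine/language | deeplearning/preprocessing.py | combine_dictionary
-- ===== SOURCE A (Python) =====
-- import operator
--
-- def combine_dictionary(base, result_dicts, thres=10):
--     """
--
--     :param base:
--     :param result_dicts:
--     :param thres: the top-thres percentage will be retained
--     :return:
--     """
--     for dic in result_dicts:
--         for word, count in dic.items():
--             try:
--                 base[word]+=count
--             except KeyError:
--                 base[word]=count
--
--     sorted_counts=sorted(base.items(), key=operator.itemgetter(1), reverse=True)
--     cutoff=sorted_counts[0:len(sorted_counts)//10]
--     return {k:v for k,v in cutoff}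
-- ===== SOURCE B (Python) =====
-- def combine_dictionary(base, result_dicts, thres=10):
--     for dic in result_dicts:
--         for word, count in dic.items():
--             base[word] = base.get(word, 0) + count
--
--     buckets = {}
--     for word, count in base.items():
--         buckets.setdefault(count, []).append((word, count))
--
--     need = len(base) // 10
--     out = {}
--     for v in sorted(buckets, reverse=True):
--         if need <= 0:
--             break
--         chunk = buckets[v][:need]
--         for word, count in chunk:
--             out[word] = count
--         need -= len(chunk)
--     return out
-- ===== Notes on version B (the rewrite author's own statement) =====
-- stated objective: alternative
-- what changed: B replaces A's full stable sort of all items followed by a slice with a bucket-based partial selection: one pass groups items into a count->bucket dict, only the distinct counts are sorted descending, and buckets are emitted in count order until the top-10% quota is filled.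
import Mathlib
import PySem

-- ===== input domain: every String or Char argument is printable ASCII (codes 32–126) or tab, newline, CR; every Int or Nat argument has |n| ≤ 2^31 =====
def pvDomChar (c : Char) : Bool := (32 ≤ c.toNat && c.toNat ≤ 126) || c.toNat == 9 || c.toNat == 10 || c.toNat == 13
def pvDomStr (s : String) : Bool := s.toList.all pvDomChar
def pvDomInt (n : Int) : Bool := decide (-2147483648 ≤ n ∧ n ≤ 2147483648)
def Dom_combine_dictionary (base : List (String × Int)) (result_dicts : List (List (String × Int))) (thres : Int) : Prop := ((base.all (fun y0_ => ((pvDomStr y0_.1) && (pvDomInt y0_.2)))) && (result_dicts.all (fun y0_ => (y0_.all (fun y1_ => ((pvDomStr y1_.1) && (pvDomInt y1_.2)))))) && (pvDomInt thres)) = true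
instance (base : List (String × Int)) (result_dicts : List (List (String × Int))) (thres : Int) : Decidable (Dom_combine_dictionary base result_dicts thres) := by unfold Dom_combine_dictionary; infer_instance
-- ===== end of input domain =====

-- B replaces A's full stable sort of the items (then slice) by a count->bucket dict built in one
-- pass plus a sort of the distinct counts only ('alternative'); A mutates `base` in place — the
-- equivalence proved here is about the RETURN value (B performs the same merge mutation in Python).

-- ===== PORT A =====
-- 'for dic in result_dicts: for word, count in dic.items(): try: base[word]+=count except KeyError: base[word]=count'
def pvMergeA (base : List (String × Int)) (result_dicts : List (List (String × Int))) : PySem.Dict String Int :=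
  result_dicts.foldl
    (fun d dic => dic.foldl
      (fun d p =>
        match d.get? p.1 with
        | some c => d.insert p.1 (c + p.2)
        | none   => d.insert p.1 p.2) d)
    (PySem.Dict.mk base)

def combine_dictionary (base : List (String × Int)) (result_dicts : List (List (String × Int))) (thres : Int) : List (String × Int) :=
  let merged := pvMergeA base result_dicts
  -- sorted_counts = sorted(base.items(), key=operator.itemgetter(1), reverse=True)
  let sorted_counts := PySem.List.sorted merged.items (fun p => p.2) true
  -- cutoff = sorted_counts[0:len(sorted_counts)//10]
  let cutoff := PySem.List.slice sorted_counts (some 0) (some (PySem.Int.floordiv (sorted_counts.length : Int) 10))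
  -- return {k:v for k,v in cutoff}
  (cutoff.foldl (fun d p => d.insert p.1 p.2) PySem.Dict.empty).items

-- ===== PORT B =====
-- 'base[word] = base.get(word, 0) + count'
def pvMergeB (base : List (String × Int)) (result_dicts : List (List (String × Int))) : PySem.Dict String Int :=
  result_dicts.foldl
    (fun d dic => dic.foldl (fun d p => d.insert p.1 (d.getD p.1 0 + p.2)) d)
    (PySem.Dict.mk base)

-- 'buckets.setdefault(count, []).append((word, count))' (append at the stored list's end,
-- key position kept — exactly Dict.modify with default [])
def pvBuckets (items : List (String × Int)) : PySem.Dict Int (List (String × Int)) :=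
  items.foldl (fun d p => d.modify p.2 [] (fun l => l ++ [p])) PySem.Dict.empty

-- 'for v in sorted(buckets, reverse=True): if need <= 0: break; chunk = buckets[v][:need];
--  for word, count in chunk: out[word] = count; need -= len(chunk)'
-- (the break is modelled by the state passing through unchanged once need ≤ 0: need never increases)
def pvEmit (buckets : PySem.Dict Int (List (String × Int))) :
    List Int → Int × PySem.Dict String Int → Int × PySem.Dict String Int
  | [], st => st
  | v :: vt, st =>
    if st.1 ≤ 0 then st
    else
      let chunk := (buckets.getD v []).take st.1.toNat
      pvEmit buckets vt (st.1 - chunk.length, chunk.foldl (fun d p => d.insert p.1 p.2) st.2)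

def combine_dictionary_alt (base : List (String × Int)) (result_dicts : List (List (String × Int))) (thres : Int) : List (String × Int) :=
  let merged := pvMergeB base result_dicts
  let buckets := pvBuckets merged.items
  let need0 : Int := PySem.Int.floordiv (merged.items.length : Int) 10
  (pvEmit buckets (PySem.List.sorted buckets.keys (fun x => x) true) (need0, PySem.Dict.empty)).2.items

-- ===== PRECONDITION & SPEC =====
def Spec_combine_dictionary (base : List (String × Int)) (result_dicts : List (List (String × Int))) (thres : Int) (out : List (String × Int)) : Prop := out = combine_dictionary_alt base result_dicts thres
instance (base : List (String × Int)) (result_dicts : List (List (String × Int))) (thres : Int) (out : List (String × Int)) : Decidable (Spec_combine_dictionary base result_dicts thres out) := by unfold Spec_combine_dictionary; infer_instance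

-- ===== CLAIM (what is proved, stated in full; the proofs are below) =====
def Claim_equal_combine_dictionary : Prop := ∀ (base : List (String × Int)) (result_dicts : List (List (String × Int))) (thres : Int), Dom_combine_dictionary base result_dicts thres → Spec_combine_dictionary base result_dicts thres (combine_dictionary base result_dicts thres)

-- ===== LEMMAS AND PROOFS =====

-- the two merge loops build the same dict
theorem pvMerge_eq (base : List (String × Int)) (result_dicts : List (List (String × Int))) :
    pvMergeA base result_dicts = pvMergeB base result_dicts := by
  unfold pvMergeA pvMergeB
  apply PySem.List.foldl_congr_mem
  intro d dic _
  apply PySem.List.foldl_congr_mem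
  intro d' p _
  cases h : d'.get? p.1 with
  | some c => rw [PySem.Dict.getD_of_get?_eq_some _ _ h]
  | none => rw [PySem.Dict.getD_of_get?_eq_none _ _ h]; simp

theorem pv_flatMap_congr {α β : Type} {l : List α} {f g : α → List β}
    (h : ∀ a ∈ l, f a = g a) : l.flatMap f = l.flatMap g := by
  induction l with
  | nil => rfl
  | cons x xs ih =>
    simp only [List.flatMap_cons, h x (by simp)]
    rw [ih (fun a ha => h a (by simp [ha]))]

theorem pv_flatMap_nil {α β : Type} (vs : List α) :
    vs.flatMap (fun _ => ([] : List β)) = [] := by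
  induction vs with
  | nil => rfl
  | cons _ _ ih => simpa using ih

-- structural equations for insertBy
theorem pv_insertBy_nil {α : Type} (before : α → α → Bool) (x : α) :
    PySem.List.insertBy before x [] = [x] := rfl

theorem pv_insertBy_cons {α : Type} (before : α → α → Bool) (x y : α) (ys : List α) :
    PySem.List.insertBy before x (y :: ys) =
      if before x y then x :: y :: ys else y :: PySem.List.insertBy before x ys := rfl

theorem pv_insertBy_append {α : Type} (before : α → α → Bool) (x : α) (l r : List α)
    (h : ∀ y ∈ l, before x y = false) :
    PySem.List.insertBy before x (l ++ r) = l ++ PySem.List.insertBy before x r := by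
  induction l with
  | nil => simp
  | cons y ys ih =>
    simp only [List.cons_append, pv_insertBy_cons, h y (by simp)]
    rw [ih (fun z hz => h z (by simp [hz]))]
    simp

-- inserting one element into a bucket decomposition appends it at the end of its bucket
theorem pv_insertBy_flatMap (vs : List Int) (x : String × Int) (xs : List (String × Int))
    (hvs : vs.Pairwise (· > ·)) (hx : x.2 ∈ vs) :
    PySem.List.insertBy (fun a b => decide ((b.2 : Int) < a.2)) x
        (vs.flatMap (fun v => xs.filter (fun p => p.2 == v)))
      = vs.flatMap (fun v => (xs ++ [x]).filter (fun p => p.2 == v)) := by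
  induction vs with
  | nil => simp at hx
  | cons v vt ih =>
    have hpw := (List.pairwise_cons.mp hvs).1
    have hvt := (List.pairwise_cons.mp hvs).2
    by_cases hv : x.2 = v
    · -- x belongs to the head bucket
      have hpre : ∀ y ∈ xs.filter (fun p => p.2 == v),
          (fun (a b : String × Int) => decide ((b.2 : Int) < a.2)) x y = false := by
        intro y hy
        have hyv : y.2 = v := by simpa using (List.mem_filter.mp hy).2
        simp [hyv, hv]
      simp only [List.flatMap_cons]
      rw [pv_insertBy_append _ _ _ _ hpre]
      have hins : PySem.List.insertBy (fun a b => decide ((b.2 : Int) < a.2)) x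
          (vt.flatMap (fun v => xs.filter (fun p => p.2 == v)))
          = x :: vt.flatMap (fun v => xs.filter (fun p => p.2 == v)) := by
        cases hc : vt.flatMap (fun v => xs.filter (fun p => p.2 == v)) with
        | nil => simp [pv_insertBy_nil]
        | cons y ys =>
          have hy : y ∈ vt.flatMap (fun v => xs.filter (fun p => p.2 == v)) := by simp [hc]
          obtain ⟨v', hv', hyf⟩ := List.mem_flatMap.mp hy
          have hyv : y.2 = v' := by simpa using (List.mem_filter.mp hyf).2
          have hlt : y.2 < x.2 := by have := hpw v' hv'; omega
          rw [pv_insertBy_cons]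
          simp [hlt]
      rw [hins]
      have hhead : (xs ++ [x]).filter (fun p => p.2 == v) = xs.filter (fun p => p.2 == v) ++ [x] := by
        simp [List.filter_append, hv]
      have htail : ∀ v' ∈ vt, (xs ++ [x]).filter (fun p => p.2 == v') = xs.filter (fun p => p.2 == v') := by
        intro v' hv'
        have hne : ¬ (x.2 = v') := by have := hpw v' hv'; omega
        simp [List.filter_append, hne]
      rw [hhead, pv_flatMap_congr htail]
      simp
    · -- x belongs to a later bucket
      have hx' : x.2 ∈ vt := by
        rcases List.mem_cons.mp hx with h | h
        · exact absurd h hv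
        · exact h
      have hgt : v > x.2 := hpw _ hx'
      have hpre : ∀ y ∈ xs.filter (fun p => p.2 == v),
          (fun (a b : String × Int) => decide ((b.2 : Int) < a.2)) x y = false := by
        intro y hy
        have hyv : y.2 = v := by simpa using (List.mem_filter.mp hy).2
        simp [hyv]; omega
      simp only [List.flatMap_cons]
      rw [pv_insertBy_append _ _ _ _ hpre]
      rw [ih hvt hx']
      have hhead : (xs ++ [x]).filter (fun p => p.2 == v) = xs.filter (fun p => p.2 == v) := by
        have hne : ¬ (x.2 = v) := hv
        simp [List.filter_append, hne]
      rw [hhead]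

-- the stable descending sort by count is the concatenation of the buckets,
-- taken along any strictly decreasing list of values covering all counts
theorem pv_sorted_rev_eq_flatMap (xs : List (String × Int)) (vs : List Int)
    (hvs : vs.Pairwise (· > ·)) (hmem : ∀ p ∈ xs, p.2 ∈ vs) :
    PySem.List.sorted xs (fun p => p.2) true
      = vs.flatMap (fun v => xs.filter (fun p => p.2 == v)) := by
  induction xs using List.reverseRecOn with
  | nil =>
    simp only [List.filter_nil]
    rw [pv_flatMap_nil vs]
    exact (PySem.List.sorted_eq_nil_iff _ _ _).mpr rfl
  | append_singleton ys x ih =>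
    have h1 : PySem.List.sorted (ys ++ [x]) (fun p => p.2) true
        = PySem.List.insertBy (fun a b => decide ((b.2 : Int) < a.2)) x
            (PySem.List.sorted ys (fun p => p.2) true) := by
      rw [PySem.List.sorted_rev_eq_foldl_insertBy, PySem.List.sorted_rev_eq_foldl_insertBy,
        List.foldl_append]
      simp
    rw [h1, ih (fun p hp => hmem p (by simp [hp]))]
    exact pv_insertBy_flatMap vs x ys hvs (hmem x (by simp))

-- B's budgeted emission over the buckets is the insert-fold over the take of the concatenation
theorem pv_emit_fold (buckets : PySem.Dict Int (List (String × Int))) (vs : List Int) :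
    ∀ (n : Int) (d : PySem.Dict String Int), 0 ≤ n →
    (pvEmit buckets vs (n, d)).2
      = ((vs.flatMap (fun v => buckets.getD v [])).take n.toNat).foldl
          (fun d p => d.insert p.1 p.2) d := by
  induction vs with
  | nil => intro n d _; simp [pvEmit]
  | cons v vt ih =>
    intro n d hn
    by_cases h0 : n ≤ 0
    · have hn0 : n = 0 := le_antisymm h0 hn
      subst hn0
      simp [pvEmit]
    · have hbr : ¬ (((n, d) : Int × PySem.Dict String Int).1 ≤ 0) := h0
      show (if ((n, d) : Int × PySem.Dict String Int).1 ≤ 0 then (n, d)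
        else
          let chunk := (buckets.getD v []).take ((n, d) : Int × PySem.Dict String Int).1.toNat
          pvEmit buckets vt (((n, d) : Int × PySem.Dict String Int).1 - chunk.length,
            chunk.foldl (fun d p => d.insert p.1 p.2) (((n, d) : Int × PySem.Dict String Int).2))).2 = _
      rw [if_neg hbr]
      show (pvEmit buckets vt (n - (((buckets.getD v []).take n.toNat).length : Int),
        ((buckets.getD v []).take n.toNat).foldl (fun d p => d.insert p.1 p.2) d)).2 = _
      have hlenle : ((buckets.getD v []).take n.toNat).length ≤ n.toNat := by simp
      rw [ih _ _ (by omega)]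
      have hcnt : (n - ((((buckets.getD v []).take n.toNat).length : Nat) : Int)).toNat
          = n.toNat - ((buckets.getD v []).take n.toNat).length := by omega
      rw [List.flatMap_cons, List.take_append, ← List.foldl_append, hcnt]
      have h2 : n.toNat - (List.take n.toNat (buckets.getD v [])).length
          = n.toNat - (buckets.getD v []).length := by
        rw [List.length_take]; omega
      rw [h2]

-- bucket dict lookups are the filters of the item list
theorem pv_buckets_getD (items : List (String × Int)) (c : Int) :
    (pvBuckets items).getD c [] = items.filter (fun p => p.2 == c) := by
  have h := PySem.Dict.getD_foldl_modify_append (items.map (fun p => (p.2, p)))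
    (PySem.Dict.empty : PySem.Dict Int (List (String × Int))) c
  rw [List.foldl_map] at h
  simp only [List.filter_map, List.map_map] at h
  have hm : ((fun (x : Int × (String × Int)) => x.2) ∘ (fun (p : String × Int) => (p.2, p)))
      = id := funext fun p => rfl
  have hf : ((fun (p : Int × (String × Int)) => p.1 == c) ∘ (fun (p : String × Int) => (p.2, p)))
      = (fun (p : String × Int) => p.2 == c) := funext fun p => rfl
  rw [hm, hf, List.map_id] at h
  simp only [PySem.Dict.getD_empty, List.nil_append] at h
  unfold pvBuckets
  exact h

-- keys of the bucket dict
theorem pv_buckets_keys (items : List (String × Int)) :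
    (pvBuckets items).keys
      = PySem.Set.update (PySem.Dict.empty : PySem.Dict Int (List (String × Int))).keys
          (items.map (fun p => p.2)) :=
  PySem.Dict.keys_foldl_modify_key items (fun p => p.2) [] (fun _ p => (fun l => l ++ [p])) PySem.Dict.empty

theorem pv_slice_take {α : Type} (l : List α) (m : Int) (hm : 0 ≤ m) :
    PySem.List.slice l (some 0) (some m) = l.take m.toNat := by
  have h := PySem.List.slice_natCast l 0 m.toNat
  rw [Int.toNat_of_nonneg hm] at h
  simpa using h

theorem pv_floordiv10_nonneg (k : Nat) : (0 : Int) ≤ PySem.Int.floordiv (k : Int) 10 := by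
  unfold PySem.Int.floordiv
  exact Int.fdiv_nonneg (by omega) (by omega)

-- the whole selection pipeline, over an arbitrary item list
theorem pv_main (items : List (String × Int)) :
    ((PySem.List.slice (PySem.List.sorted items (fun p => p.2) true) (some 0)
        (some (PySem.Int.floordiv ((PySem.List.sorted items (fun p => p.2) true).length : Int) 10))).foldl
        (fun d p => d.insert p.1 p.2) PySem.Dict.empty).items
      = (pvEmit (pvBuckets items)
          (PySem.List.sorted (pvBuckets items).keys (fun x => x) true)
          (PySem.Int.floordiv ((items.length : Int)) 10, PySem.Dict.empty)).2.items := by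
  have hlen : (PySem.List.sorted items (fun p => p.2) true).length = items.length :=
    (PySem.List.sorted_perm items (fun p => p.2) true).length_eq
  have hd10 := pv_floordiv10_nonneg items.length
  have hnodupk : (pvBuckets items).keys.Nodup :=
    PySem.Dict.nodup_keys_foldl_modify_key items (fun p => p.2) [] (fun _ p => (fun l => l ++ [p]))
      PySem.Dict.empty (by simp [PySem.Dict.keys_empty])
  have hnodup : (PySem.List.sorted (pvBuckets items).keys (fun x => x) true).Nodup :=
    ((PySem.List.sorted_perm (pvBuckets items).keys (fun x => x) true).nodup_iff).mpr hnodupk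
  have hpw : (PySem.List.sorted (pvBuckets items).keys (fun x => x) true).Pairwise (· > ·) := by
    have h1 := PySem.List.sorted_pairwise_rev (pvBuckets items).keys (fun x => x)
    have h2 : (PySem.List.sorted (pvBuckets items).keys (fun x => x) true).Pairwise (· ≠ ·) := hnodup
    exact (h1.and h2).imp (fun h => lt_of_le_of_ne h.1 (Ne.symm h.2))
  have hmem : ∀ p ∈ items, p.2 ∈ PySem.List.sorted (pvBuckets items).keys (fun x => x) true := by
    intro p hp
    rw [PySem.List.mem_sorted, pv_buckets_keys, PySem.Set.mem_update]
    right
    exact List.mem_map.mpr ⟨p, hp, rfl⟩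
  have hgetD : (fun v => (pvBuckets items).getD v []) = (fun v => items.filter (fun p => p.2 == v)) :=
    funext (fun v => pv_buckets_getD items v)
  rw [hlen, pv_slice_take _ _ hd10,
    pv_emit_fold (pvBuckets items) _ _ _ hd10, hgetD,
    ← pv_sorted_rev_eq_flatMap items _ hpw hmem]

-- ===== VERDICT (by name: the statement is the Claim_ definition above) =====
theorem combine_dictionary_spec : Claim_equal_combine_dictionary := by
  intro base result_dicts thres _
  unfold Spec_combine_dictionary combine_dictionary combine_dictionary_alt
  rw [pvMerge_eq]
  exact pv_main (pvMergeB base result_dicts).items
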